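-- pv_equiv track=rewrite | github.com/Yanming-Yang/idioMine | Source_code_for_IdioMine/ast_to_graph.py | get_dfg_edges
-- ===== SOURCE A (Python) =====
-- from typing import List, Tuple, Iterable, Optional, Dict
--
-- def get_dfg_edges(dfg_DefUse: List[Tuple[str, List[int], List[int]]]) -> List[Tuple[int, int, str]]:
--     dfg_edges = []
--     var_names = [DefUse[0] for DefUse in dfg_DefUse]
--     var_def_nodes = [sorted(list(set(DefUse[1]))) for DefUse in dfg_DefUse]
--     var_use_nodes = [sorted(list(set(DefUse[2]))) for DefUse in dfg_DefUse]
--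
--     for i in range(len(var_names)): # var
--         def_use_indexs = []
--         if len(var_def_nodes[i]) > 0 and len(var_use_nodes[i]) > 0:
--             for j in range(len(var_def_nodes[i])):
--                 for k in range(len(var_use_nodes[i])):
--                     if var_def_nodes[i][j] < var_use_nodes[i][k]:
--                         def_use_indexs.append(k)
--                         break
--             if len(def_use_indexs) > 0:
--                 for j in range(len(def_use_indexs)):
--                     dfg_edges.append((var_def_nodes[i][j], var_use_nodes[i][def_use_indexs[j]], 'DFG_DefUse'))
--                 if len(def_use_indexs) == 1:
--                     for j in range(def_use_indexs[0], len(var_use_nodes[i]) - 1):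
--                         dfg_edges.append((var_use_nodes[i][j], var_use_nodes[i][j + 1], 'DFG_UseUse'))
--                 else:
--                     for j in range(1, len(def_use_indexs)):
--                         for k in range(def_use_indexs[j - 1], def_use_indexs[j] - 1):
--                             dfg_edges.append((var_use_nodes[i][k], var_use_nodes[i][k + 1], 'DFG_UseUse'))
--                     for j in range(def_use_indexs[len(def_use_indexs) - 1], len(var_use_nodes[i]) - 1):
--                         dfg_edges.append((var_use_nodes[i][j], var_use_nodes[i][j + 1], 'DFG_UseUse'))
--     return dfg_edges
-- ===== SOURCE B (Python) =====
-- from bisect import bisect_right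
--
-- def get_dfg_edges(dfg_DefUse):
--     edges = []
--     for name, defs, uses in dfg_DefUse:
--         def_nodes = sorted(set(defs))
--         use_nodes = sorted(set(uses))
--         # first strictly-later use for each def, by binary search; defs are
--         # sorted, so once a def has no later use, none of the rest do either
--         idx = []
--         for d in def_nodes:
--             k = bisect_right(use_nodes, d)
--             if k == len(use_nodes):
--                 break
--             idx.append(k)
--         if not idx:
--             continue
--         for j, k in enumerate(idx):
--             edges.append((def_nodes[j], use_nodes[k], 'DFG_DefUse'))
--         for j in range(1, len(idx)):
--             for k in range(idx[j - 1], idx[j] - 1):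
--                 edges.append((use_nodes[k], use_nodes[k + 1], 'DFG_UseUse'))
--         for k in range(idx[-1], len(use_nodes) - 1):
--             edges.append((use_nodes[k], use_nodes[k + 1], 'DFG_UseUse'))
--     return edges
-- ===== Notes on version B (the rewrite author's own statement) =====
-- stated objective: faster
-- what changed: Replaces the quadratic inner scan over all use nodes for every def node with a binary search (bisect_right) plus an early break once a def has no later use, drops the pre-materialized per-variable arrays and the redundant single-def/multi-def branch, and iterates the input directly.
import Mathlib
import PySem

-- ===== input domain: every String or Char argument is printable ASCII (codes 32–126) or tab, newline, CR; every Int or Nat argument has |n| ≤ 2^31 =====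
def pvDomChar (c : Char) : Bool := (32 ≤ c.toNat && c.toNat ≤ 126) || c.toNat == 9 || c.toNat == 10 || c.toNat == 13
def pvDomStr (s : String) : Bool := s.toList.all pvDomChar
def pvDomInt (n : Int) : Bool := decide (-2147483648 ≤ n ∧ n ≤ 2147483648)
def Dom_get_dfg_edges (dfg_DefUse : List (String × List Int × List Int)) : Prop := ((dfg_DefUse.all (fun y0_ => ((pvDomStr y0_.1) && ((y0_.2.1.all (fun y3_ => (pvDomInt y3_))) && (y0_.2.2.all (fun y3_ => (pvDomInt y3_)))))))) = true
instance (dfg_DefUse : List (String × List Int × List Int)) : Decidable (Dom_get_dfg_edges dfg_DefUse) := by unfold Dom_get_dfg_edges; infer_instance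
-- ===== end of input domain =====

-- ===== PORT A =====
-- B replaces A's linear scan over all use nodes per def node by bisect_right with an
-- early break (objective: faster; asymptotic: D*U -> D log U per variable).

-- sorted(list(set(xs)))  (shared text in both Pythons)
def pvSortedSet (xs : List Int) : List Int :=
  PySem.List.sorted (PySem.Set.ofList xs) (fun v => v)

-- 'for j in range(a, b): edges.append((U[j], U[j+1], 'DFG_UseUse'))'  (identical loop text in both Pythons)
def pvChain (U : List Int) (a b : Int) : List (Int × Int × String) :=
  (PySem.List.pyRange a b 1).foldl
    (fun acc j => acc ++ [(PySem.List.pyGetD U j 0, PySem.List.pyGetD U (j + 1) 0, "DFG_UseUse")]) []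

-- A's inner 'for k in range(len(U)): if d < U[k]: append k; break' (recursion over the range list)
def pvAInner (d : Int) (U : List Int) : List Int → List Int
  | [] => []
  | k :: ks => if d < PySem.List.pyGetD U k 0 then [k] else pvAInner d U ks

-- A's def_use_indexs loop
def pvAIdx (D U : List Int) : List Int :=
  (PySem.List.pyRange 0 (PySem.List.len D) 1).foldl
    (fun acc j =>
      acc ++ pvAInner (PySem.List.pyGetD D j 0) U (PySem.List.pyRange 0 (PySem.List.len U) 1)) []

-- A's loop body for one variable i (the edges it appends for D = var_def_nodes[i], U = var_use_nodes[i])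
def pvABody (D U : List Int) : List (Int × Int × String) :=
  if 0 < PySem.List.len D ∧ 0 < PySem.List.len U then
    let idx := pvAIdx D U
    if 0 < PySem.List.len idx then
      ((PySem.List.pyRange 0 (PySem.List.len idx) 1).foldl
        (fun acc j =>
          acc ++ [(PySem.List.pyGetD D j 0,
                   PySem.List.pyGetD U (PySem.List.pyGetD idx j 0) 0, "DFG_DefUse")]) [])
      ++ (if PySem.List.len idx = 1 then
            pvChain U (PySem.List.pyGetD idx 0 0) (PySem.List.len U - 1)
          else
            ((PySem.List.pyRange 1 (PySem.List.len idx) 1).foldl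
              (fun acc j =>
                acc ++ pvChain U (PySem.List.pyGetD idx (j - 1) 0)
                                 (PySem.List.pyGetD idx j 0 - 1)) [])
            ++ pvChain U (PySem.List.pyGetD idx (PySem.List.len idx - 1) 0)
                         (PySem.List.len U - 1))
    else []
  else []

def get_dfg_edges (dfg_DefUse : List (String × List Int × List Int)) : List (Int × Int × String) :=
  let var_names := dfg_DefUse.map (fun t => t.1)
  let var_def_nodes := dfg_DefUse.map (fun t => pvSortedSet t.2.1)
  let var_use_nodes := dfg_DefUse.map (fun t => pvSortedSet t.2.2)
  (PySem.List.pyRange 0 (PySem.List.len var_names) 1).foldl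
    (fun acc i =>
      acc ++ pvABody (PySem.List.pyGetD var_def_nodes i [])
                     (PySem.List.pyGetD var_use_nodes i [])) []

-- ===== PORT B =====
-- B's 'for d in D: k = bisect_right(U, d); if k == len(U): break; idx.append(k)'
def pvBIdx (U : List Int) : List Int → List Int
  | [] => []
  | d :: rest =>
    let k : Int := (PySem.List.bisectRight U d : Int)
    if k = PySem.List.len U then [] else k :: pvBIdx U rest

-- B's loop body for one variable
def pvBBody (D U : List Int) : List (Int × Int × String) :=
  let idx := pvBIdx U D
  if 0 < PySem.List.len idx then
    ((PySem.List.enumerate idx).foldl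
      (fun acc p =>
        acc ++ [(PySem.List.pyGetD D p.1 0, PySem.List.pyGetD U p.2 0, "DFG_DefUse")]) [])
    ++ ((PySem.List.pyRange 1 (PySem.List.len idx) 1).foldl
         (fun acc j =>
           acc ++ pvChain U (PySem.List.pyGetD idx (j - 1) 0)
                            (PySem.List.pyGetD idx j 0 - 1)) [])
    ++ pvChain U (PySem.List.pyGetD idx (-1) 0) (PySem.List.len U - 1)
  else []

def get_dfg_edges_alt (dfg_DefUse : List (String × List Int × List Int)) : List (Int × Int × String) :=
  dfg_DefUse.foldl
    (fun acc t => acc ++ pvBBody (pvSortedSet t.2.1) (pvSortedSet t.2.2)) []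

-- ===== PRECONDITION & SPEC =====
def Spec_get_dfg_edges (dfg_DefUse : List (String × List Int × List Int)) (out : List (Int × Int × String)) : Prop := out = get_dfg_edges_alt dfg_DefUse
instance (dfg_DefUse : List (String × List Int × List Int)) (out : List (Int × Int × String)) : Decidable (Spec_get_dfg_edges dfg_DefUse out) := by unfold Spec_get_dfg_edges; infer_instance

-- ===== CLAIM (what is proved, stated in full; the proofs are below) =====
def Claim_equal_get_dfg_edges : Prop := ∀ (dfg_DefUse : List (String × List Int × List Int)), Dom_get_dfg_edges dfg_DefUse → Spec_get_dfg_edges dfg_DefUse (get_dfg_edges dfg_DefUse)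

-- ===== LEMMAS AND PROOFS =====

theorem pvAInner_range_eq (U : List Int) (d : Int) (n : Nat) (hn : n ≤ U.length)
    (low : ∀ j (hj : j < U.length), j < n → U[j] ≤ d)
    (high : ∀ j (hj : j < U.length), n ≤ j → d < U[j]) :
    ∀ a : Nat, a ≤ n →
      pvAInner d U (PySem.List.pyRange a U.length 1) =
        if n < U.length then [(n : Int)] else [] := by
  have main : ∀ m (a : Nat), a ≤ n → U.length - a = m →
      pvAInner d U (PySem.List.pyRange a U.length 1) =
        if n < U.length then [(n : Int)] else [] := by
    intro m
    induction m with
    | zero =>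
      intro a ha hm
      have h1 : U.length ≤ a := by omega
      have h2 : n = U.length := by omega
      rw [PySem.List.pyRange_one_eq_nil (by exact_mod_cast h1)]
      simp [pvAInner, h2]
    | succ m ih =>
      intro a ha hm
      have h1 : a < U.length := by omega
      rw [PySem.List.pyRange_one_cons (by exact_mod_cast h1)]
      have hget : PySem.List.pyGetD U (a : Int) 0 = U[a] := by
        rw [PySem.List.pyGetD_natCast, List.getD_eq_getElem U 0 h1]
      rw [pvAInner, hget]
      by_cases hda : d < U[a]
      · have han : a = n := by
          by_contra hne
          exact absurd (low a h1 (by omega)) (by omega)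
        rw [if_pos hda, han, if_pos (han ▸ h1)]
      · have han : a < n := by
          by_contra hge
          exact hda (high a h1 (by omega))
        rw [if_neg hda]
        have : ((a : Int) + 1) = ((a + 1 : Nat) : Int) := by push_cast; ring
        rw [this]
        exact ih (a + 1) (by omega) (by omega)
  intro a ha
  exact main (U.length - a) a ha rfl

theorem bisect_mono_none (U : List Int) (hU : U.Pairwise (· ≤ ·)) (d d' : Int) (hdd : d ≤ d')
    (h : PySem.List.bisectRight U d = U.length) : PySem.List.bisectRight U d' = U.length := by
  obtain ⟨hle, hlow, _⟩ := PySem.List.bisectRight_spec U d hU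
  obtain ⟨hle', _, hhigh'⟩ := PySem.List.bisectRight_spec U d' hU
  by_contra hne
  have hlt : PySem.List.bisectRight U d' < U.length := by omega
  have h1 : d' < U[PySem.List.bisectRight U d'] := hhigh' _ hlt (le_refl _)
  have h2 : U[PySem.List.bisectRight U d'] ≤ d := hlow _ hlt (by omega)
  omega

theorem pvAInner_eq_bisect (U : List Int) (hU : U.Pairwise (· ≤ ·)) (d : Int) :
    pvAInner d U (PySem.List.pyRange 0 (PySem.List.len U) 1) =
      if PySem.List.bisectRight U d < U.length then [(PySem.List.bisectRight U d : Int)] else [] := by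
  obtain ⟨hle, hlow, hhigh⟩ := PySem.List.bisectRight_spec U d hU
  have h0 : PySem.List.len U = ((U.length : Nat) : Int) := by simp [PySem.List.len]
  rw [h0]
  exact pvAInner_range_eq U d _ hle hlow hhigh 0 (Nat.zero_le _)

theorem idx_eq (U : List Int) (hU : U.Pairwise (· ≤ ·)) :
    ∀ D : List Int, D.Pairwise (· ≤ ·) → pvAIdx D U = pvBIdx U D := by
  have hflat : ∀ D : List Int, pvAIdx D U =
      D.flatMap (fun dj => pvAInner dj U (PySem.List.pyRange 0 (PySem.List.len U) 1)) := by
    intro D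
    unfold pvAIdx
    have h0 : PySem.List.len D = ((D.length : Nat) : Int) := by simp [PySem.List.len]
    rw [h0, PySem.List.foldl_pyRange_zero_pyGetD' D 0
      (fun acc dj => acc ++ pvAInner dj U (PySem.List.pyRange 0 (PySem.List.len U) 1)) [],
      PySem.List.foldl_append_eq_flatMap]
    simp
  intro D hD
  rw [hflat]
  induction D with
  | nil => simp [pvBIdx]
  | cons d rest ih =>
    have hpre := List.pairwise_cons.mp hD
    rw [List.flatMap_cons, pvAInner_eq_bisect U hU d, pvBIdx]
    by_cases hlt : PySem.List.bisectRight U d < U.length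
    · have hne : ((PySem.List.bisectRight U d : Nat) : Int) ≠ PySem.List.len U := by
        simp [PySem.List.len]; omega
      rw [if_pos hlt, if_neg hne, List.singleton_append, ih hpre.2]
    · have heq : PySem.List.bisectRight U d = U.length := by
        have := (PySem.List.bisectRight_spec U d hU).1; omega
      have hzero : ((PySem.List.bisectRight U d : Nat) : Int) = PySem.List.len U := by
        simp [PySem.List.len, heq]
      rw [if_neg hlt, if_pos hzero, List.nil_append]
      rw [List.flatMap_eq_nil_iff.mpr]
      intro x hx
      rw [pvAInner_eq_bisect U hU x,
        if_neg (by have := bisect_mono_none U hU d x (hpre.1 x hx) heq; omega)]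

theorem pvBIdx_mem (U : List Int) (hU : U.Pairwise (· ≤ ·)) :
    ∀ D k, k ∈ pvBIdx U D → 0 ≤ k ∧ k < PySem.List.len U := by
  intro D
  induction D with
  | nil => simp [pvBIdx]
  | cons d rest ih =>
    intro k hk
    rw [pvBIdx] at hk
    by_cases h : ((PySem.List.bisectRight U d : Nat) : Int) = PySem.List.len U
    · simp [h] at hk
    · rw [if_neg h] at hk
      rcases List.mem_cons.mp hk with h1 | h1
      · subst h1
        have := (PySem.List.bisectRight_spec U d hU).1
        have hlen : PySem.List.len U = ((U.length : Nat) : Int) := by simp [PySem.List.len]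
        rw [hlen] at h ⊢
        constructor
        · positivity
        · omega
      · exact ih k h1

theorem range_getD_eq_enumerate {β : Type} (f : Int → Int → β) :
    ∀ (xs : List Int) (s : Int),
      (List.range xs.length).map (fun k : Nat => f (s + (k : Int)) (PySem.List.pyGetD xs (k : Int) 0)) =
        (PySem.List.enumerate xs s).map (fun p => f p.1 p.2) := by
  intro xs
  induction xs with
  | nil => simp
  | cons x t ih =>
    intro s
    rw [PySem.List.enumerate_cons, List.map_cons, ← ih (s + 1)]
    rw [List.length_cons, List.range_succ_eq_map, List.map_cons, List.map_map]
    congr 1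
    · norm_num [PySem.List.pyGetD_zero_cons]
    · apply List.map_congr_left
      intro k _
      simp only [Function.comp]
      have h1 : ((Nat.succ k : Nat) : Int) = (k : Int) + 1 := by push_cast; ring
      have h2 : PySem.List.pyGetD (x :: t) ((k : Int) + 1) 0 = PySem.List.pyGetD t (k : Int) 0 := by
        have : ((k : Int) + 1) = ((k + 1 : Nat) : Int) := by push_cast; ring
        rw [this, PySem.List.pyGetD_natCast, PySem.List.pyGetD_natCast]
        simp
      rw [h1, h2]
      congr 1
      ring

theorem body_eq (D U : List Int) (hD : D.Pairwise (· < ·)) (hU : U.Pairwise (· < ·)) :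
    pvABody D U = pvBBody D U := by
  have hD' : D.Pairwise (· ≤ ·) := hD.imp (fun h => le_of_lt h)
  have hU' : U.Pairwise (· ≤ ·) := hU.imp (fun h => le_of_lt h)
  have hidx := idx_eq U hU' D hD'
  simp only [pvABody, pvBBody, hidx]
  by_cases hne : 0 < PySem.List.len (pvBIdx U D)
  · have hnil : pvBIdx U D ≠ [] := by
      intro h; rw [h] at hne; simp [PySem.List.len] at hne
    obtain ⟨k0, tl, hcons⟩ := List.exists_cons_of_ne_nil hnil
    have hU0 : 0 < PySem.List.len U := by
      have := pvBIdx_mem U hU' D k0 (by rw [hcons]; exact List.mem_cons_self)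
      omega
    have hD0 : 0 < PySem.List.len D := by
      cases D with
      | nil => rw [show pvBIdx U [] = [] from rfl] at hnil; exact absurd rfl hnil
      | cons d r => simp [PySem.List.len]
    rw [if_pos ⟨hD0, hU0⟩, if_pos hne, if_pos hne, List.append_assoc]
    congr 1
    · -- DefUse edges
      rw [PySem.List.foldl_append_singleton_eq_map, PySem.List.foldl_append_singleton_eq_map,
        List.nil_append, List.nil_append]
      have hlen : PySem.List.len (pvBIdx U D) = (((pvBIdx U D).length : Nat) : Int) := by
        simp [PySem.List.len]
      rw [hlen, PySem.List.pyRange_one, List.map_map]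
      have h0 : ((((pvBIdx U D).length : Nat) : Int) - 0).toNat = (pvBIdx U D).length := by omega
      rw [h0]
      have hre := range_getD_eq_enumerate
        (fun a b => (PySem.List.pyGetD D a 0, PySem.List.pyGetD U b 0, ("DFG_DefUse" : String)))
        (pvBIdx U D) 0
      simp only [Function.comp_def]
      simpa using hre
    · -- UseUse edges
      by_cases hone : PySem.List.len (pvBIdx U D) = 1
      · have hlen1 : (pvBIdx U D).length = 1 := by
          simp [PySem.List.len] at hone; omega
        obtain ⟨k, hk⟩ := List.length_eq_one_iff.mp hlen1
        rw [if_pos hone, hk]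
        have e1 : PySem.List.pyGetD [k] (-1) 0 = k := by
          rw [PySem.List.pyGetD_neg_one [k] 0 (by simp)]; simp
        have e2 : PySem.List.pyGetD [k] 0 0 = k := PySem.List.pyGetD_zero_cons k [] 0
        have hr : PySem.List.pyRange 1 (PySem.List.len [k]) 1 = [] :=
          PySem.List.pyRange_one_eq_nil (by simp [PySem.List.len])
        rw [e1, e2, hr, List.foldl_nil, List.nil_append]
      · rw [if_neg hone]
        have hlen : PySem.List.len (pvBIdx U D) = (((pvBIdx U D).length : Nat) : Int) := by
          simp [PySem.List.len]
        have hpos : 0 < (pvBIdx U D).length := by rw [hlen] at hne; omega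
        have e : PySem.List.pyGetD (pvBIdx U D) (PySem.List.len (pvBIdx U D) - 1) 0 =
            PySem.List.pyGetD (pvBIdx U D) (-1) 0 := by
          have hc : PySem.List.len (pvBIdx U D) - 1 = (((pvBIdx U D).length - 1 : Nat) : Int) := by
            rw [hlen]; omega
          rw [PySem.List.pyGetD_neg_one _ 0 hnil, hc, PySem.List.pyGetD_natCast,
            List.getD_eq_getElem _ 0 (by omega), List.getLast_eq_getElem]
        rw [e]
  · rw [if_neg hne]
    split_ifs with h1 <;> rfl

theorem pvSortedSet_pairwise (xs : List Int) : (pvSortedSet xs).Pairwise (· < ·) :=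
  PySem.List.sorted_ofList_pairwise_lt xs

theorem flatMap_body_eq (l : List (String × List Int × List Int)) :
    l.flatMap (fun t => pvABody (pvSortedSet t.2.1) (pvSortedSet t.2.2)) =
      l.flatMap (fun t => pvBBody (pvSortedSet t.2.1) (pvSortedSet t.2.2)) := by
  induction l with
  | nil => rfl
  | cons t r ih =>
    rw [List.flatMap_cons, List.flatMap_cons, ih,
      body_eq _ _ (pvSortedSet_pairwise _) (pvSortedSet_pairwise _)]

-- ===== VERDICT (by name: the statement is the Claim_ definition above) =====
theorem get_dfg_edges_spec : Claim_equal_get_dfg_edges := by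
  intro l _hdom
  unfold Spec_get_dfg_edges get_dfg_edges get_dfg_edges_alt
  show (List.foldl
      (fun (acc : List (Int × Int × String)) (i : Int) =>
        acc ++ pvABody (PySem.List.pyGetD (l.map (fun t => pvSortedSet t.2.1)) i [])
                       (PySem.List.pyGetD (l.map (fun t => pvSortedSet t.2.2)) i [])) []
      (PySem.List.pyRange 0 (PySem.List.len (l.map (fun t => t.1))) 1)) =
    List.foldl (fun acc t => acc ++ pvBBody (pvSortedSet t.2.1) (pvSortedSet t.2.2)) [] l
  have hA : (fun (acc : List (Int × Int × String)) (i : Int) =>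
      acc ++ pvABody (PySem.List.pyGetD (l.map (fun t => pvSortedSet t.2.1)) i [])
                     (PySem.List.pyGetD (l.map (fun t => pvSortedSet t.2.2)) i [])) =
      (fun (acc : List (Int × Int × String)) (i : Int) =>
        acc ++ pvABody
          (pvSortedSet (PySem.List.pyGetD l i (("", ([], [])) :
              String × List Int × List Int)).2.1)
          (pvSortedSet (PySem.List.pyGetD l i (("", ([], [])) :
              String × List Int × List Int)).2.2)) := by
    funext acc i
    show acc ++ pvABody
        (PySem.List.pyGetD (l.map (fun t => pvSortedSet t.2.1)) i
          (pvSortedSet ((("", ([], [])) : String × List Int × List Int)).2.1))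
        (PySem.List.pyGetD (l.map (fun t => pvSortedSet t.2.2)) i
          (pvSortedSet ((("", ([], [])) : String × List Int × List Int)).2.2)) = _
    rw [PySem.List.pyGetD_map (fun t => pvSortedSet t.2.1) l i,
      PySem.List.pyGetD_map (fun t => pvSortedSet t.2.2) l i]
  have hlen : PySem.List.len (l.map (fun t => t.1)) = ((l.length : Nat) : Int) := by
    simp [PySem.List.len]
  rw [hA, hlen,
    PySem.List.foldl_pyRange_zero_pyGetD' l (("", ([], [])) : String × List Int × List Int)
      (fun acc t => acc ++ pvABody (pvSortedSet t.2.1) (pvSortedSet t.2.2)) [],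
    PySem.List.foldl_append_eq_flatMap, PySem.List.foldl_append_eq_flatMap,
    List.nil_append, List.nil_append]
  exact flatMap_body_eq l
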